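-- pv_equiv track=rewrite | github.com/pypi-data/pypi-mirror-398 | packages/bitbully/bitbully-0.0.69.tar.gz/bitbully-0.0.69/tests/test_docstrings.py | pair_python_with_expected
-- ===== SOURCE A (Python) =====
-- def pair_python_with_expected(blocks: list[tuple[str, str]]) -> list[tuple[str, str | None]]:
--     """Pair Python code blocks with their corresponding expected output blocks.
--
--     This function processes a list of `(language, content)` tuples—such as those
--     extracted from Markdown fenced code blocks—and returns pairs consisting of
--     a Python code block (`python` or `py`) and its subsequent non-Python block
--     (`''`, `'text'`, `'txt'`, or `'none'`), if one exists. The non-Python block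
--     is treated as the *expected* stdout for the preceding Python block.
--
--     Args:
--         blocks (list[tuple[str, str]]): A list of `(language, content)` pairs.
--             Each element represents a code block, where `language` is a short
--             identifier such as `'python'`, `'text'`, or an empty string, and
--             `content` is the block's text content.
--
--     Returns:
--         list[tuple[str, str | None]]: A list of pairs `(python_code, expected_output)`,
--         where `expected_output` may be `None` if no matching text block follows
--         the Python code.
--     """
--     pairs: list[tuple[str, str | None]] = []
--     i = 0
--     while i < len(blocks):
--         lang, body = blocks[i]
--         if lang in {"python", "py"}:
--             expected = None
--             if i + 1 < len(blocks) and blocks[i + 1][0] in {"", "text", "txt", "none"}: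
--                 expected = blocks[i + 1][1]
--                 i += 1  # consume expected
--             pairs.append((body, expected))
--         i += 1
--     return pairs
-- ===== SOURCE B (Python) =====
-- def pair_python_with_expected(blocks: list[tuple[str, str]]) -> list[tuple[str, str | None]]:
--     """Single forward pass with a carried `pending` Python block instead of index look-ahead."""
--     pairs: list[tuple[str, str | None]] = []
--     pending: str | None = None
--     for lang, body in blocks:
--         if lang in {"", "text", "txt", "none"}:
--             if pending is not None:
--                 pairs.append((pending, body))
--                 pending = None
--         elif lang in {"python", "py"}:
--             if pending is not None:
--                 pairs.append((pending, None))
--             pending = body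
--         else:
--             if pending is not None:
--                 pairs.append((pending, None))
--                 pending = None
--     if pending is not None:
--         pairs.append((pending, None))
--     return pairs
-- ===== Notes on version B (the rewrite author's own statement) =====
-- stated objective: alternative
-- what changed: Replaced the index-based while loop with look-ahead/consume (i += 1 twice) by a single for-loop over the blocks that carries a `pending` Python block and flushes it on a following text block, on the next Python block, on any other block, and at end of input.
import Mathlib
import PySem

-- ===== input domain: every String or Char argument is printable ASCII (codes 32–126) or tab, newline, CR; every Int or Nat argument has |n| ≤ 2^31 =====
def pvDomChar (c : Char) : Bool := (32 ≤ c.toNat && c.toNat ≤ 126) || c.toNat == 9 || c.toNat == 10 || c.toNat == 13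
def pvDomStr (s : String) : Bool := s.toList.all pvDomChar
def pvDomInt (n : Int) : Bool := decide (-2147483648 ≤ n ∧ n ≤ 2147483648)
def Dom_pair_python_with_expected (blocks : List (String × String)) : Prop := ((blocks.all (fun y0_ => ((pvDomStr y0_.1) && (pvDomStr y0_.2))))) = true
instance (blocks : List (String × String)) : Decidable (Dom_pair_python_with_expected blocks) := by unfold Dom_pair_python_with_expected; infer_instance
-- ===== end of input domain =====

-- B replaces A's index-based look-ahead (consume i+1) by a single pass carrying a `pending` Python block that is flushed on the following block or at the end; same return value (alternative decomposition, no speed claim).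

-- ===== PORT A =====
-- lang in {"python","py"}
def pvIsPy (l : String) : Bool := l = "python" || l = "py"
-- blocks[i+1][0] in {"", "text", "txt", "none"}
def pvIsText (l : String) : Bool := l = "" || l = "text" || l = "txt" || l = "none"

-- A's while loop over index i, as recursion on the remaining blocks, with the
-- look-ahead blocks[i+1] as a second-level pattern; the `i += 1  # consume expected`
-- branch drops the look-ahead block.
def pair_python_with_expected : List (String × String) → List (String × Option String)
  | [] => []
  | [(lang, body)] => if pvIsPy lang then [(body, none)] else []
  | (lang, body) :: (l2, b2) :: rest2 =>
    if pvIsPy lang then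
      if pvIsText l2 then (body, some b2) :: pair_python_with_expected rest2
      else (body, none) :: pair_python_with_expected ((l2, b2) :: rest2)
    else pair_python_with_expected ((l2, b2) :: rest2)
termination_by blocks => blocks.length
decreasing_by all_goals simp

-- ===== PORT B =====
-- one step of B's for-loop: state = (pairs so far, pending Python body)
def pvAltStep (st : List (String × Option String) × Option String) (blk : String × String) :
    List (String × Option String) × Option String :=
  if pvIsText blk.1 then
    match st.2 with
    | some p => (st.1 ++ [(p, some blk.2)], none)
    | none => st
  else if pvIsPy blk.1 then
    ((match st.2 with | some p => st.1 ++ [(p, none)] | none => st.1), some blk.2)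
  else
    match st.2 with
    | some p => (st.1 ++ [(p, none)], none)
    | none => st

def pair_python_with_expected_alt (blocks : List (String × String)) : List (String × Option String) :=
  let st := blocks.foldl pvAltStep ([], none)
  match st.2 with
  | some p => st.1 ++ [(p, none)]
  | none => st.1

-- ===== PRECONDITION & SPEC =====
def Spec_pair_python_with_expected (blocks : List (String × String)) (out : List (String × Option String)) : Prop := out = pair_python_with_expected_alt blocks
instance (blocks : List (String × String)) (out : List (String × Option String)) : Decidable (Spec_pair_python_with_expected blocks out) := by unfold Spec_pair_python_with_expected; infer_instance

-- ===== CLAIM (what is proved, stated in full; the proofs are below) =====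
def Claim_equal_pair_python_with_expected : Prop := ∀ (blocks : List (String × String)), Dom_pair_python_with_expected blocks → Spec_pair_python_with_expected blocks (pair_python_with_expected blocks)

-- ===== LEMMAS AND PROOFS =====
-- final flush of B's state
def pvFinish (st : List (String × Option String) × Option String) : List (String × Option String) :=
  match st.2 with
  | some p => st.1 ++ [(p, none)]
  | none => st.1

theorem pvAltStep_acc (acc : List (String × Option String)) (pd : Option String) (blk : String × String) :
    pvAltStep (acc, pd) blk = (acc ++ (pvAltStep ([], pd) blk).1, (pvAltStep ([], pd) blk).2) := by
  cases pd <;> simp [pvAltStep] <;> split_ifs <;> simp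

theorem pvFoldl_acc (blocks : List (String × String)) (acc : List (String × Option String)) (pd : Option String) :
    pvFinish (blocks.foldl pvAltStep (acc, pd)) = acc ++ pvFinish (blocks.foldl pvAltStep ([], pd)) := by
  induction blocks generalizing acc pd with
  | nil => cases pd <;> simp [pvFinish]
  | cons blk rest ih =>
    simp only [List.foldl_cons]
    rw [pvAltStep_acc, ih]
    conv_rhs => rw [pvAltStep_acc [] pd blk, ih]
    simp

theorem pvIsText_not_py (l : String) (h : pvIsText l = true) : pvIsPy l = false := by
  simp only [pvIsText, Bool.or_eq_true, decide_eq_true_eq] at h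
  rcases h with ((h | h) | h) | h <;> subst h <;> decide

theorem pvPy_head (l b : String) (rest : List (String × String)) (h : pvIsPy l = true) :
    pair_python_with_expected ((l, b) :: rest) = pair_python_with_expected (("python", b) :: rest) := by
  have h' : l = "python" ∨ l = "py" := by simpa [pvIsPy] using h
  cases rest with
  | nil => rcases h' with h' | h' <;> subst h' <;> simp [pair_python_with_expected, pvIsPy]
  | cons p r =>
    obtain ⟨l2, b2⟩ := p
    rcases h' with h' | h' <;> subst h' <;> simp [pair_python_with_expected, pvIsPy]

theorem pvSkip (l b : String) (rest : List (String × String)) (h : pvIsPy l = false) :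
    pair_python_with_expected ((l, b) :: rest) = pair_python_with_expected rest := by
  cases rest with
  | nil => simp [pair_python_with_expected, h]
  | cons p r => obtain ⟨l2, b2⟩ := p; simp [pair_python_with_expected, h]

theorem pvMain (blocks : List (String × String)) :
    pvFinish (blocks.foldl pvAltStep ([], none)) = pair_python_with_expected blocks
    ∧ ∀ b : String, pvFinish (blocks.foldl pvAltStep ([], some b)) =
        pair_python_with_expected (("python", b) :: blocks) := by
  induction blocks with
  | nil =>
    constructor
    · simp [pvFinish, pair_python_with_expected]
    · intro b; simp [pvFinish, pair_python_with_expected, pvIsPy]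
  | cons blk rest ih =>
    obtain ⟨l, b⟩ := blk
    constructor
    · rw [List.foldl_cons]
      by_cases ht : pvIsText l = true
      · have hs : pvAltStep ([], none) (l, b) = ([], none) := by simp [pvAltStep, ht]
        rw [hs, ih.1, pvSkip l b rest (pvIsText_not_py l ht)]
      · by_cases hp : pvIsPy l = true
        · have hs : pvAltStep ([], none) (l, b) = ([], some b) := by simp [pvAltStep, ht, hp]
          rw [hs, ih.2 b, pvPy_head l b rest hp]
        · rw [Bool.not_eq_true] at hp
          have hs : pvAltStep ([], none) (l, b) = ([], none) := by simp [pvAltStep, ht, hp]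
          rw [hs, ih.1, pvSkip l b rest hp]
    · intro b0
      rw [List.foldl_cons]
      by_cases ht : pvIsText l = true
      · have hs : pvAltStep ([], some b0) (l, b) = ([(b0, some b)], none) := by
          simp [pvAltStep, ht]
        rw [hs, pvFoldl_acc, ih.1]
        simp [pair_python_with_expected, pvIsPy, ht]
      · by_cases hp : pvIsPy l = true
        · have hs : pvAltStep ([], some b0) (l, b) = ([(b0, none)], some b) := by
            simp [pvAltStep, ht, hp]
          rw [hs, pvFoldl_acc, ih.2 b]
          have h2 : pair_python_with_expected (("python", b0) :: (l, b) :: rest)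
              = (b0, none) :: pair_python_with_expected ((l, b) :: rest) := by
            simp [pair_python_with_expected, pvIsPy, ht]
          rw [h2, pvPy_head l b rest hp]
          simp
        · rw [Bool.not_eq_true] at hp
          have hs : pvAltStep ([], some b0) (l, b) = ([(b0, none)], none) := by
            simp [pvAltStep, ht, hp]
          rw [hs, pvFoldl_acc, ih.1]
          have h2 : pair_python_with_expected (("python", b0) :: (l, b) :: rest)
              = (b0, none) :: pair_python_with_expected ((l, b) :: rest) := by
            simp [pair_python_with_expected, pvIsPy, ht]
          rw [h2, pvSkip l b rest hp]
          simp

theorem pvAlt_eq (blocks : List (String × String)) :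
    pair_python_with_expected_alt blocks = pair_python_with_expected blocks := by
  have h := (pvMain blocks).1
  simpa [pair_python_with_expected_alt, pvFinish] using h

-- ===== VERDICT (by name: the statement is the Claim_ definition above) =====
theorem pair_python_with_expected_spec : Claim_equal_pair_python_with_expected := by
  intro blocks _
  unfold Spec_pair_python_with_expected
  exact (pvAlt_eq blocks).symm
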